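-- pv_equiv track=rewrite | github.com/Cas-B/profiling-fingerprinting | profiling.py | computeErrorNgrams
-- ===== SOURCE A (Python) =====
-- def checkForSharedKey(ngrams_dict_smaller, ngrams_dict_larger):
--     count = 0
--     for ngram in ngrams_dict_smaller.keys():
--         if ngram in ngrams_dict_larger.keys():
--             count += 1
--
--     if count == 0:
--         return 0
--     else:
--         return 1
--
-- def computeErrorNgrams(ngrams_dict_count_smaller, ngrams_dict_count_larger, unique_ngrams_smaller, unique_ngrams_larger):
--     if checkForSharedKey(unique_ngrams_smaller, unique_ngrams_larger) == 0:
--         return -1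
--
--     error = 0
--     for ngram in unique_ngrams_smaller.keys():
--         if ngram in unique_ngrams_larger.keys():
--             error += (abs(ngrams_dict_count_smaller[ngram] - ngrams_dict_count_larger[ngram]))
--     return error
-- ===== SOURCE B (Python) =====
-- def computeErrorNgrams(ngrams_dict_count_smaller, ngrams_dict_count_larger, unique_ngrams_smaller, unique_ngrams_larger):
--     shared = False
--     error = 0
--     for ngram in unique_ngrams_smaller.keys():
--         if ngram in unique_ngrams_larger:
--             shared = True
--             error += abs(ngrams_dict_count_smaller[ngram] - ngrams_dict_count_larger[ngram])
--     return error if shared else -1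
-- ===== Notes on version B (the rewrite author's own statement) =====
-- stated objective: simpler
-- what changed: Replaces A's two full scans (the checkForSharedKey helper pass plus a second accumulation pass) with one traversal that maintains a shared flag and the running error together, returning -1 only if the flag never fired.
import Mathlib
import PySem

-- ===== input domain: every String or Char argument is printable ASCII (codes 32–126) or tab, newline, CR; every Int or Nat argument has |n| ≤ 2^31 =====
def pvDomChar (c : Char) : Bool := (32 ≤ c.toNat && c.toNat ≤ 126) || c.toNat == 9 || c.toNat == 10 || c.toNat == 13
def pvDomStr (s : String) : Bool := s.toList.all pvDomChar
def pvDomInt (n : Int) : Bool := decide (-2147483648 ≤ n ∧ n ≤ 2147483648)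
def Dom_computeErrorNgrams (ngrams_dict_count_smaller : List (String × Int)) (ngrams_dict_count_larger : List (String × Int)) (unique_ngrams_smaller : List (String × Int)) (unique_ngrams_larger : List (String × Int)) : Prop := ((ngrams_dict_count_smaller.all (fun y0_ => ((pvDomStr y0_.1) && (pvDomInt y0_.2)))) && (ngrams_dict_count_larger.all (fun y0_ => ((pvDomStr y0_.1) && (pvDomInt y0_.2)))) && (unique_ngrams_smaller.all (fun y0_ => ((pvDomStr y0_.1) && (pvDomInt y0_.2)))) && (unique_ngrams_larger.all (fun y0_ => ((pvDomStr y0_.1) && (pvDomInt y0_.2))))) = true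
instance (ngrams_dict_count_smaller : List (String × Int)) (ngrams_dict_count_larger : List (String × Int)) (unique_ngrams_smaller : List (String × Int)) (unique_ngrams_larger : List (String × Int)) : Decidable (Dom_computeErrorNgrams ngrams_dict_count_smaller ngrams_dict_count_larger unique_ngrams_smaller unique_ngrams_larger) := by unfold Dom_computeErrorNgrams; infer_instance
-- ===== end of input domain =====

-- B folds A's two scans (shared-key check helper + accumulation loop) into one pass
-- carrying a shared flag and the running error; return-value equivalence on Pre_
-- (shared keys present in both count dicts, i.e. where the Python A does not raise KeyError).


-- ===== PORT A =====
-- helper: counts shared keys, returns 0 or 1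
def checkForSharedKey (ngrams_dict_smaller : List (String × Int)) (ngrams_dict_larger : List (String × Int)) : Int :=
  let count : Int :=
    (PySem.Dict.ofList ngrams_dict_smaller).keys.foldl
      (fun count ngram =>
        if (PySem.Dict.ofList ngrams_dict_larger).contains ngram then count + 1 else count) 0
  if count = 0 then 0 else 1

def computeErrorNgrams (ngrams_dict_count_smaller : List (String × Int)) (ngrams_dict_count_larger : List (String × Int)) (unique_ngrams_smaller : List (String × Int)) (unique_ngrams_larger : List (String × Int)) : Int :=
  if checkForSharedKey unique_ngrams_smaller unique_ngrams_larger = 0 then -1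
  else
    -- dict[ngram] would raise KeyError on a missing key; Pre_ excludes that, so getD 0 is exact on Pre_
    (PySem.Dict.ofList unique_ngrams_smaller).keys.foldl
      (fun error ngram =>
        if (PySem.Dict.ofList unique_ngrams_larger).contains ngram then
          error + |((PySem.Dict.ofList ngrams_dict_count_smaller).getD ngram 0) -
                   ((PySem.Dict.ofList ngrams_dict_count_larger).getD ngram 0)|
        else error) 0

-- ===== PORT B =====
def computeErrorNgrams_alt (ngrams_dict_count_smaller : List (String × Int)) (ngrams_dict_count_larger : List (String × Int)) (unique_ngrams_smaller : List (String × Int)) (unique_ngrams_larger : List (String × Int)) : Int :=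
  let st :=
    (PySem.Dict.ofList unique_ngrams_smaller).keys.foldl
      (fun (st : Bool × Int) ngram =>
        if (PySem.Dict.ofList unique_ngrams_larger).contains ngram then
          (true, st.2 + |((PySem.Dict.ofList ngrams_dict_count_smaller).getD ngram 0) -
                        ((PySem.Dict.ofList ngrams_dict_count_larger).getD ngram 0)|)
        else st) (false, 0)
  if st.1 then st.2 else -1

-- ===== PRECONDITION & SPEC =====
-- Pre_ excludes exactly the inputs where Python A raises KeyError: a shared unique-ngram key
-- missing from one of the two count dicts (B raises there too).
def Pre_computeErrorNgrams (ngrams_dict_count_smaller : List (String × Int)) (ngrams_dict_count_larger : List (String × Int)) (unique_ngrams_smaller : List (String × Int)) (unique_ngrams_larger : List (String × Int)) : Prop :=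
  ∀ k ∈ (PySem.Dict.ofList unique_ngrams_smaller).keys,
    (PySem.Dict.ofList unique_ngrams_larger).contains k = true →
      (PySem.Dict.ofList ngrams_dict_count_smaller).contains k = true ∧
      (PySem.Dict.ofList ngrams_dict_count_larger).contains k = true
instance (ngrams_dict_count_smaller : List (String × Int)) (ngrams_dict_count_larger : List (String × Int)) (unique_ngrams_smaller : List (String × Int)) (unique_ngrams_larger : List (String × Int)) : Decidable (Pre_computeErrorNgrams ngrams_dict_count_smaller ngrams_dict_count_larger unique_ngrams_smaller unique_ngrams_larger) := by unfold Pre_computeErrorNgrams; infer_instance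

def pvWitness_computeErrorNgrams : (List (String × Int)) × (List (String × Int)) × (List (String × Int)) × (List (String × Int)) :=
  ([("x", 3)], [("x", 5)], [("x", 1), ("y", 2)], [("x", 1)])

def Spec_computeErrorNgrams (ngrams_dict_count_smaller : List (String × Int)) (ngrams_dict_count_larger : List (String × Int)) (unique_ngrams_smaller : List (String × Int)) (unique_ngrams_larger : List (String × Int)) (out : Int) : Prop := out = computeErrorNgrams_alt ngrams_dict_count_smaller ngrams_dict_count_larger unique_ngrams_smaller unique_ngrams_larger
instance (ngrams_dict_count_smaller : List (String × Int)) (ngrams_dict_count_larger : List (String × Int)) (unique_ngrams_smaller : List (String × Int)) (unique_ngrams_larger : List (String × Int)) (out : Int) : Decidable (Spec_computeErrorNgrams ngrams_dict_count_smaller ngrams_dict_count_larger unique_ngrams_smaller unique_ngrams_larger out) := by unfold Spec_computeErrorNgrams; infer_instance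

-- ===== CLAIM (what is proved, stated in full; the proofs are below) =====
def Claim_equal_computeErrorNgrams : Prop := ∀ (ngrams_dict_count_smaller : List (String × Int)) (ngrams_dict_count_larger : List (String × Int)) (unique_ngrams_smaller : List (String × Int)) (unique_ngrams_larger : List (String × Int)), Dom_computeErrorNgrams ngrams_dict_count_smaller ngrams_dict_count_larger unique_ngrams_smaller unique_ngrams_larger → Pre_computeErrorNgrams ngrams_dict_count_smaller ngrams_dict_count_larger unique_ngrams_smaller unique_ngrams_larger → Spec_computeErrorNgrams ngrams_dict_count_smaller ngrams_dict_count_larger unique_ngrams_smaller unique_ngrams_larger (computeErrorNgrams ngrams_dict_count_smaller ngrams_dict_count_larger unique_ngrams_smaller unique_ngrams_larger)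

-- ===== LEMMAS AND PROOFS =====
-- A's count fold computes init + (number of keys satisfying p)
theorem foldlCount_eq (p : String → Bool) (ks : List String) (c : Int) :
    ks.foldl (fun c k => if p k then c + 1 else c) c = c + (ks.countP p : Int) := by
  induction ks generalizing c with
  | nil => simp
  | cons k ks ih =>
    simp only [List.foldl_cons, List.countP_cons]
    by_cases h : p k = true <;> simp [h, ih] <;> ring

-- B's fold, first component: true iff some key satisfies p
theorem foldlB_fst (p : String → Bool) (w : String → Int) (ks : List String) (s : Bool) (e : Int) :
    (ks.foldl (fun (st : Bool × Int) k => if p k then (true, st.2 + w k) else st) (s, e)).1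
      = (s || ks.any p) := by
  induction ks generalizing s e with
  | nil => simp
  | cons k ks ih =>
    simp only [List.foldl_cons, List.any_cons]
    by_cases h : p k = true <;> simp [h, ih]

-- B's fold, second component: equals A's error fold from the same start
theorem foldlB_snd (p : String → Bool) (w : String → Int) (ks : List String) (s : Bool) (e : Int) :
    (ks.foldl (fun (st : Bool × Int) k => if p k then (true, st.2 + w k) else st) (s, e)).2
      = ks.foldl (fun e k => if p k then e + w k else e) e := by
  induction ks generalizing s e with
  | nil => simp
  | cons k ks ih =>
    simp only [List.foldl_cons]
    by_cases h : p k = true <;> simp [h, ih]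

-- ===== VERDICT (by name: the statement is the Claim_ definition above) =====
theorem computeErrorNgrams_spec : Claim_equal_computeErrorNgrams := by
  intro cs cl us ul _hdom _hpre
  unfold Spec_computeErrorNgrams computeErrorNgrams computeErrorNgrams_alt checkForSharedKey
  simp only [foldlCount_eq, foldlB_fst, foldlB_snd, Bool.false_or, Int.zero_add]
  have hiff : ((((PySem.Dict.ofList us).keys.countP
      (fun k => (PySem.Dict.ofList ul).contains k)) : Int) = 0)
      ↔ ¬ ((PySem.Dict.ofList us).keys.any (fun k => (PySem.Dict.ofList ul).contains k) = true) := by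
    rw [List.any_eq_true]
    rw [show ∀ n : Nat, ((n : Int) = 0 ↔ n = 0) from fun n => by omega]
    rw [List.countP_eq_zero]
    simp
  by_cases h : (PySem.Dict.ofList us).keys.any (fun k => (PySem.Dict.ofList ul).contains k) = true
  · have hc := (not_iff_not.mpr hiff).mpr (not_not.mpr h)
    rw [if_neg hc, if_neg (by norm_num : ¬ ((1 : Int) = 0)), if_pos h]
  · have hc := hiff.mpr h
    rw [if_pos hc, if_pos rfl, if_neg h]
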